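-- pv_equiv track=rewrite | github.com/morgornis/algorithms | trees.py | max_min_multiplication
-- ===== SOURCE A (Python) =====
-- def max_min_multiplication(data):
--     if len(data) < 3:
--         return -1
--
--     min_index = 1
--     max_index = 2
--
--     # Находим индекс минимального элемента (левые узлы)
--     i = 1
--     while i < len(data):
--         min_index = i
--         i = 2 * i + 1  # Переход к следующему левому узлу
--
--     # Находим индекс максимального элемента (правые узлы)
--     i = 2
--     while i < len(data):
--         max_index = i
--         i = 2 * i + 2  # Переход к следующему правому узлу
--
--     result = data[min_index] * data[max_index]
--     return result
-- ===== SOURCE B (Python) =====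
-- def max_min_multiplication(data):
--     n = len(data)
--     if n < 3:
--         return -1
--     # leftmost-path indices are 2**k - 1, rightmost-path indices are 2**k - 2;
--     # the last in-range ones follow directly from bit lengths.
--     min_index = 2 ** (n.bit_length() - 1) - 1
--     max_index = 2 ** ((n + 1).bit_length() - 1) - 2
--     return data[min_index] * data[max_index]
-- ===== Notes on version B (the rewrite author's own statement) =====
-- stated objective: alternative
-- what changed: Replaces both index-walking while-loops with closed-form indices computed from bit lengths (leftmost path ends at 2^(bitlen(n)-1)-1, rightmost at 2^(bitlen(n+1)-1)-2).
import Mathlib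
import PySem

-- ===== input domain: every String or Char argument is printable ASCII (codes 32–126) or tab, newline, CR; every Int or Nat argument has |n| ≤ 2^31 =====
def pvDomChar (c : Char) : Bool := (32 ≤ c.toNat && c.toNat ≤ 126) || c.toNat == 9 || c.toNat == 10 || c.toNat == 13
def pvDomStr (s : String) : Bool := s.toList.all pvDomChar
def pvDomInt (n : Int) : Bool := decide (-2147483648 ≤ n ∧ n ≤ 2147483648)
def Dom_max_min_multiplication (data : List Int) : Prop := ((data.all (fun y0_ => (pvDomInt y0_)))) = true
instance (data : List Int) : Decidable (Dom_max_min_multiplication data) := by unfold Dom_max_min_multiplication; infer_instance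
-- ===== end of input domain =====

-- B replaces A's two index-walking while-loops by closed-form indices computed from bit lengths (alternative decomposition, same result).

-- ===== PORT A =====
-- while i < len(data): min_index = i; i = 2*i + 1
def pvLoopL (n i acc : Nat) : Nat :=
  if i < n then pvLoopL n (2 * i + 1) i else acc
termination_by n - i
decreasing_by omega

-- while i < len(data): max_index = i; i = 2*i + 2
def pvLoopR (n i acc : Nat) : Nat :=
  if i < n then pvLoopR n (2 * i + 2) i else acc
termination_by n - i
decreasing_by omega

def max_min_multiplication (data : List Int) : Int :=
  if data.length < 3 then -1
  else
    let minIdx := pvLoopL data.length 1 1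
    let maxIdx := pvLoopR data.length 2 2
    -- data[min_index] * data[max_index]; both indices are in range, so getD 0 never fires
    ((PySem.List.pyGet? data (minIdx : Int)).getD 0) *
    ((PySem.List.pyGet? data (maxIdx : Int)).getD 0)

-- ===== PORT B =====
def max_min_multiplication_alt (data : List Int) : Int :=
  let n := data.length
  if n < 3 then -1
  else
    -- min_index = 2 ** (n.bit_length() - 1) - 1; max_index = 2 ** ((n+1).bit_length() - 1) - 2
    let minIdx : Nat := 2 ^ (PySem.Int.bitLength (n : Int) - 1) - 1
    let maxIdx : Nat := 2 ^ (PySem.Int.bitLength ((n : Int) + 1) - 1) - 2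
    ((PySem.List.pyGet? data (minIdx : Int)).getD 0) *
    ((PySem.List.pyGet? data (maxIdx : Int)).getD 0)

-- ===== PRECONDITION & SPEC =====
def Spec_max_min_multiplication (data : List Int) (out : Int) : Prop := out = max_min_multiplication_alt data
instance (data : List Int) (out : Int) : Decidable (Spec_max_min_multiplication data out) := by unfold Spec_max_min_multiplication; infer_instance

-- ===== CLAIM (what is proved, stated in full; the proofs are below) =====
def Claim_equal_max_min_multiplication : Prop := ∀ (data : List Int), Dom_max_min_multiplication data → Spec_max_min_multiplication data (max_min_multiplication data)

-- ===== LEMMAS AND PROOFS =====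

-- The left loop, started at an index of the form 2^m - 1 that is still in range,
-- stops with accumulator 2^K - 1, where K is characterised by 2^K ≤ n < 2^(K+1).
theorem pvLoopL_eq (d : Nat) : ∀ (n m K acc : Nat), n ≤ 2 ^ m + d → 2 ^ m - 1 < n →
    2 ^ K ≤ n → n < 2 ^ (K + 1) → pvLoopL n (2 ^ m - 1) acc = 2 ^ K - 1 := by
  induction d with
  | zero =>
    intro n m K acc hd h hK1 hK2
    have hm1 : 1 ≤ 2 ^ m := Nat.one_le_two_pow
    rw [pvLoopL, if_pos h, pvLoopL, if_neg (by omega)]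
    -- here n = 2^m, so K = m
    have hmK : m = K := by
      by_contra hne
      rcases Nat.lt_or_ge m K with hlt | hge
      · have : 2 ^ (m + 1) ≤ 2 ^ K := Nat.pow_le_pow_right (by norm_num) hlt
        have := Nat.pow_lt_pow_right (a := 2) (by norm_num) (Nat.lt_succ_self m)
        omega
      · have hKm : K < m := lt_of_le_of_ne hge (Ne.symm (by omega))
        have : 2 ^ (K + 1) ≤ 2 ^ m := Nat.pow_le_pow_right (by norm_num) hKm
        omega
    rw [hmK]
  | succ d ih =>
    intro n m K acc hd h hK1 hK2
    have hm1 : 1 ≤ 2 ^ m := Nat.one_le_two_pow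
    rw [pvLoopL, if_pos h]
    by_cases h2 : 2 * (2 ^ m - 1) + 1 < n
    · have he : 2 * (2 ^ m - 1) + 1 = 2 ^ (m + 1) - 1 := by
        have : 2 ^ (m + 1) = 2 * 2 ^ m := by rw [Nat.pow_succ]; ring
        omega
      rw [he]
      have hp : 2 ^ (m + 1) = 2 * 2 ^ m := by rw [Nat.pow_succ]; ring
      exact ih n (m + 1) K (2 ^ m - 1) (by omega) (by omega) hK1 hK2
    · rw [pvLoopL, if_neg h2]
      have hp : 2 ^ (m + 1) = 2 * 2 ^ m := by rw [Nat.pow_succ]; ring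
      have hmK : m = K := by
        by_contra hne
        rcases Nat.lt_or_ge m K with hlt | hge
        · have : 2 ^ (m + 1) ≤ 2 ^ K := Nat.pow_le_pow_right (by norm_num) hlt
          omega
        · have hKm : K < m := lt_of_le_of_ne hge (Ne.symm (by omega))
          have : 2 ^ (K + 1) ≤ 2 ^ m := Nat.pow_le_pow_right (by norm_num) hKm
          omega
      rw [hmK]

-- Same for the right loop with indices of the form 2^m - 2; K is characterised via n + 1.
theorem pvLoopR_eq (d : Nat) : ∀ (n m K acc : Nat), n ≤ 2 ^ m + d → 1 ≤ m → 2 ^ m - 2 < n →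
    2 ^ K ≤ n + 1 → n + 1 < 2 ^ (K + 1) → pvLoopR n (2 ^ m - 2) acc = 2 ^ K - 2 := by
  induction d with
  | zero =>
    intro n m K acc hd hm h hK1 hK2
    have hm1 : 2 ≤ 2 ^ m := by
      calc 2 = 2 ^ 1 := rfl
      _ ≤ 2 ^ m := Nat.pow_le_pow_right (by norm_num) hm
    rw [pvLoopR, if_pos h, pvLoopR, if_neg (by omega)]
    have hmK : m = K := by
      by_contra hne
      rcases Nat.lt_or_ge m K with hlt | hge
      · have : 2 ^ (m + 1) ≤ 2 ^ K := Nat.pow_le_pow_right (by norm_num) hlt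
        have hp : 2 ^ (m + 1) = 2 * 2 ^ m := by rw [Nat.pow_succ]; ring
        omega
      · have hKm : K < m := lt_of_le_of_ne hge (Ne.symm (by omega))
        have : 2 ^ (K + 1) ≤ 2 ^ m := Nat.pow_le_pow_right (by norm_num) hKm
        omega
    rw [hmK]
  | succ d ih =>
    intro n m K acc hd hm h hK1 hK2
    have hm1 : 2 ≤ 2 ^ m := by
      calc 2 = 2 ^ 1 := rfl
      _ ≤ 2 ^ m := Nat.pow_le_pow_right (by norm_num) hm
    rw [pvLoopR, if_pos h]
    have hp : 2 ^ (m + 1) = 2 * 2 ^ m := by rw [Nat.pow_succ]; ring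
    by_cases h2 : 2 * (2 ^ m - 2) + 2 < n
    · have he : 2 * (2 ^ m - 2) + 2 = 2 ^ (m + 1) - 2 := by omega
      rw [he]
      exact ih n (m + 1) K (2 ^ m - 2) (by omega) (by omega) (by omega) hK1 hK2
    · rw [pvLoopR, if_neg h2]
      have hmK : m = K := by
        by_contra hne
        rcases Nat.lt_or_ge m K with hlt | hge
        · have : 2 ^ (m + 1) ≤ 2 ^ K := Nat.pow_le_pow_right (by norm_num) hlt
          omega
        · have hKm : K < m := lt_of_le_of_ne hge (Ne.symm (by omega))
          have : 2 ^ (K + 1) ≤ 2 ^ m := Nat.pow_le_pow_right (by norm_num) hKm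
          omega
      rw [hmK]

-- ===== VERDICT (by name: the statement is the Claim_ definition above) =====
theorem max_min_multiplication_spec : Claim_equal_max_min_multiplication := by
  intro data _
  unfold Spec_max_min_multiplication max_min_multiplication max_min_multiplication_alt
  by_cases h3 : data.length < 3
  · simp [h3]
  · simp only [h3]
    have hn3 : 3 ≤ data.length := by omega
    set n := data.length with hn
    -- bit length of n
    have hne : (n : Int) ≠ 0 := by positivity
    have hlo : 2 ^ (PySem.Int.bitLength (n : Int) - 1) ≤ n := by
      have := PySem.Int.two_pow_bitLength_le (n : Int) hne
      simpa using this
    have hhi : n < 2 ^ (PySem.Int.bitLength (n : Int)) := by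
      have := PySem.Int.lt_two_pow_bitLength (n : Int)
      simpa using this
    have hb1 : 1 ≤ PySem.Int.bitLength (n : Int) := by
      by_contra hb
      have : PySem.Int.bitLength (n : Int) = 0 := by omega
      rw [this] at hhi; simp at hhi; omega
    -- bit length of n + 1
    have hne' : ((n : Int) + 1) ≠ 0 := by positivity
    have hlo' : 2 ^ (PySem.Int.bitLength ((n : Int) + 1) - 1) ≤ n + 1 := by
      have := PySem.Int.two_pow_bitLength_le ((n : Int) + 1) hne'
      have hcast : ((n : Int) + 1).natAbs = n + 1 := by omega
      omega
    have hhi' : n + 1 < 2 ^ (PySem.Int.bitLength ((n : Int) + 1)) := by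
      have := PySem.Int.lt_two_pow_bitLength ((n : Int) + 1)
      have hcast : ((n : Int) + 1).natAbs = n + 1 := by omega
      omega
    have hb1' : 1 ≤ PySem.Int.bitLength ((n : Int) + 1) := by
      by_contra hb
      have : PySem.Int.bitLength ((n : Int) + 1) = 0 := by omega
      rw [this] at hhi'; simp at hhi'
    have hL : pvLoopL n 1 1 = 2 ^ (PySem.Int.bitLength (n : Int) - 1) - 1 := by
      have h1 : (1 : Nat) = 2 ^ 1 - 1 := rfl
      rw [h1]
      exact pvLoopL_eq n n 1 (PySem.Int.bitLength (n : Int) - 1) (2 ^ 1 - 1)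
        (by omega) (by omega) hlo (by have : PySem.Int.bitLength (n : Int) - 1 + 1 = PySem.Int.bitLength (n : Int) := by omega
                                      rw [this]; exact hhi)
    have hR : pvLoopR n 2 2 = 2 ^ (PySem.Int.bitLength ((n : Int) + 1) - 1) - 2 := by
      have h2 : (2 : Nat) = 2 ^ 2 - 2 := rfl
      rw [h2]
      exact pvLoopR_eq n n 2 (PySem.Int.bitLength ((n : Int) + 1) - 1) (2 ^ 2 - 2)
        (by omega) (by omega) (by omega) hlo'
        (by have : PySem.Int.bitLength ((n : Int) + 1) - 1 + 1 = PySem.Int.bitLength ((n : Int) + 1) := by omega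
            rw [this]; exact hhi')
    rw [hL, hR]
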